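-- pv_equiv track=rewrite | github.com/ELMERWANG/PEAttack | gdn_model/helper_func.py | mask_importance_list
-- ===== SOURCE A (Python) =====
-- def find_index(sensor_name):
--     # List of sensor and actuator names
--     index_list = ["FIT101", "LIT101", "MV101", "P101", "P102", "AIT201", "AIT202", "AIT203",
--                   "FIT201", "MV201", "P201", "P202", "P203", "P204", "P205", "P206", "DPIT301",
--                   "FIT301", "LIT301", "MV301", "MV302", "MV303", "MV304", "P301", "P302",
--                   "AIT401", "AIT402", "FIT401", "LIT401", "P401", "P402", "P403", "P404",
--                   "UV401", "AIT501", "AIT502", "AIT503", "AIT504", "FIT501", "FIT502",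
--                   "FIT503", "FIT504", "P501", "P502", "PIT501", "PIT502", "PIT503", "FIT601",
--                   "P601", "P602", "P603"]
--
--     # Try to find the index of the sensor_name in the list
--     try:
--         return index_list.index(sensor_name)
--     except ValueError:
--         # If the sensor_name is not in the list, return -1
--         return -1
--
-- def remove_element_by_value(input_list, value):
--     # Try to remove the element if it exists in the list
--     try:
--         input_list.remove(value)
--     except ValueError:
--         # If the value is not in the list, pass
--         pass
--     return input_list
--
-- def mask_importance_list(attack_id):
--
--     importance_list = [47, 46, 16, 27, 35, 26, 39, 38, 44, 37, 17, 34, 0, 1, 5, 6, 7, 8, 18, 25, 28, 36, 40, 41, 45]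
--     removal_mapping = {
--         "A3": 'LIT101',
--         "A6": 'AIT202',
--         "A7": 'LIT301',
--         "A8": 'DPIT301',
--         "A10": 'FIT401',
--         "A11": 'FIT401',
--         "A16": 'LIT301',
--         "A19": 'AIT504',
--         "A20": 'AIT504',
--         "A21": 'LIT101',
--         "A22": 'AIT502',
--         "A23": 'DPIT301',
--         "A25": 'LIT401',
--         "A26": 'LIT301',
--         "A27": 'LIT401',
--         "A30": 'LIT101',
--         "A31": 'LIT401',
--         "A32": 'LIT301',
--         "A33": 'LIT101',
--         "A36": 'LIT101',
--         "A37": 'FIT502',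
--         "A38": ['AIT402', 'AIT502'],
--         "A39": ['FIT401', 'AIT502'],
--         "A40": 'FIT401',
--         "A41": 'LIT301'
--     }
--
--     # Processing based on attack_id
--     if attack_id in removal_mapping:
--         elements_to_remove = removal_mapping[attack_id]
--         if isinstance(elements_to_remove, list):
--             for element in elements_to_remove:
--                 importance_list = remove_element_by_value(importance_list, find_index(element))
--         else:
--             importance_list = remove_element_by_value(importance_list, find_index(elements_to_remove))
--     elif attack_id in {"A1", "A2", "A4", "A5", "A9", "A12", "A13", "A14", "A15", "A17", "A18", "A24", "A28", "A29", "A34", "A35"}: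
--         pass # either the associated features are actuators or there is no actual attack happened
--
--     return importance_list
-- ===== SOURCE B (Python) =====
-- # The sensor-name -> index resolution is constant, so B folds it away entirely:
-- # a single table mapping each attack id to the pre-resolved index set to drop,
-- # and one filtering pass over the constant importance list.
-- _REMOVED_INDICES = {
--     "A3": {1}, "A6": {6}, "A7": {18}, "A8": {16}, "A10": {27}, "A11": {27},
--     "A16": {18}, "A19": {37}, "A20": {37}, "A21": {1}, "A22": {35},
--     "A23": {16}, "A25": {28}, "A26": {18}, "A27": {28}, "A30": {1},
--     "A31": {28}, "A32": {18}, "A33": {1}, "A36": {1}, "A37": {39},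
--     "A38": {26, 35}, "A39": {27, 35}, "A40": {27}, "A41": {18},
-- }
--
-- def mask_importance_list(attack_id):
--     removed = _REMOVED_INDICES.get(attack_id, set())
--     return [v for v in [47, 46, 16, 27, 35, 26, 39, 38, 44, 37, 17, 34, 0, 1, 5, 6, 7, 8, 18, 25, 28, 36, 40, 41, 45] if v not in removed]
-- ===== Notes on version B (the rewrite author's own statement) =====
-- stated objective: simpler
-- what changed: B folds the constant sensor-name-to-index resolution away entirely: a single precomputed table maps each attack id directly to the set of indices to drop, and the result is one filtering pass over the constant list, replacing A's isinstance branching, name lookup with try/except index(), and repeated mutating remove() calls.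
import Mathlib
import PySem

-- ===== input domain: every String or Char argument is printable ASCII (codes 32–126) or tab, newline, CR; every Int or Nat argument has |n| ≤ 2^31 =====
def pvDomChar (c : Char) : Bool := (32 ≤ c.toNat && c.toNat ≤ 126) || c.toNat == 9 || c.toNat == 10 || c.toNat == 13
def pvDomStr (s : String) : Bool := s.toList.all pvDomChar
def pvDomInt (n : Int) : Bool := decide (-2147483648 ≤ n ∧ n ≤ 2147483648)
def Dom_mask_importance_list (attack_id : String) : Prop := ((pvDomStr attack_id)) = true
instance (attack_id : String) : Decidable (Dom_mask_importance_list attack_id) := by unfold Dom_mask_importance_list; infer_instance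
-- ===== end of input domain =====

-- B pre-resolves the constant sensor-name->index mapping into one attack_id -> index-set
-- table and builds the result in a single filtering pass (objective: simpler).

-- ===== PORT A =====
-- helper of A: find_index (list.index with ValueError -> -1)
def pvIndexListA : List String :=
  ["FIT101", "LIT101", "MV101", "P101", "P102", "AIT201", "AIT202", "AIT203", "FIT201", "MV201", "P201", "P202", "P203", "P204", "P205", "P206", "DPIT301", "FIT301", "LIT301", "MV301", "MV302", "MV303", "MV304", "P301", "P302", "AIT401", "AIT402", "FIT401", "LIT401", "P401", "P402", "P403", "P404", "UV401", "AIT501", "AIT502", "AIT503", "AIT504", "FIT501", "FIT502", "FIT503", "FIT504", "P501", "P502", "PIT501", "PIT502", "PIT503", "FIT601", "P601", "P602", "P603"]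

def find_index (sensor_name : String) : Int :=
  match PySem.List.index? pvIndexListA sensor_name with
  | some i => (i : Int)
  | none => -1

-- helper of A: remove_element_by_value (list.remove with ValueError -> pass)
def remove_element_by_value (input_list : List Int) (value : Int) : List Int :=
  match PySem.List.remove? input_list value with
  | some l => l
  | none => input_list

-- removal_mapping of A: values are either a single string (Sum.inl) or a list (Sum.inr),
-- mirroring Python's str-or-list values tested with isinstance
def pvRemovalMappingA : PySem.Dict String (String ⊕ List String) :=
  PySem.Dict.ofList
  [("A3", Sum.inl "LIT101"),
   ("A6", Sum.inl "AIT202"),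
   ("A7", Sum.inl "LIT301"),
   ("A8", Sum.inl "DPIT301"),
   ("A10", Sum.inl "FIT401"),
   ("A11", Sum.inl "FIT401"),
   ("A16", Sum.inl "LIT301"),
   ("A19", Sum.inl "AIT504"),
   ("A20", Sum.inl "AIT504"),
   ("A21", Sum.inl "LIT101"),
   ("A22", Sum.inl "AIT502"),
   ("A23", Sum.inl "DPIT301"),
   ("A25", Sum.inl "LIT401"),
   ("A26", Sum.inl "LIT301"),
   ("A27", Sum.inl "LIT401"),
   ("A30", Sum.inl "LIT101"),
   ("A31", Sum.inl "LIT401"),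
   ("A32", Sum.inl "LIT301"),
   ("A33", Sum.inl "LIT101"),
   ("A36", Sum.inl "LIT101"),
   ("A37", Sum.inl "FIT502"),
   ("A38", Sum.inr ["AIT402", "AIT502"]),
   ("A39", Sum.inr ["FIT401", "AIT502"]),
   ("A40", Sum.inl "FIT401"),
   ("A41", Sum.inl "LIT301")]

def mask_importance_list (attack_id : String) : List Int :=
  let importance_list : List Int := [47, 46, 16, 27, 35, 26, 39, 38, 44, 37, 17, 34, 0, 1, 5, 6, 7, 8, 18, 25, 28, 36, 40, 41, 45]
  if PySem.Dict.contains pvRemovalMappingA attack_id then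
    match PySem.Dict.get? pvRemovalMappingA attack_id with
    | some (Sum.inr elems) =>
        elems.foldl (fun l e => remove_element_by_value l (find_index e)) importance_list
    | some (Sum.inl s) => remove_element_by_value importance_list (find_index s)
    | none => importance_list
  else importance_list

-- ===== PORT B =====
-- _REMOVED_INDICES of Source B: attack id -> pre-resolved set of indices to drop
def pvRemovedIndicesB : PySem.Dict String (PySem.Set Int) :=
  PySem.Dict.ofList
  [("A3", PySem.Set.ofList [1]), ("A6", PySem.Set.ofList [6]), ("A7", PySem.Set.ofList [18]),
   ("A8", PySem.Set.ofList [16]), ("A10", PySem.Set.ofList [27]), ("A11", PySem.Set.ofList [27]),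
   ("A16", PySem.Set.ofList [18]), ("A19", PySem.Set.ofList [37]), ("A20", PySem.Set.ofList [37]),
   ("A21", PySem.Set.ofList [1]), ("A22", PySem.Set.ofList [35]), ("A23", PySem.Set.ofList [16]),
   ("A25", PySem.Set.ofList [28]), ("A26", PySem.Set.ofList [18]), ("A27", PySem.Set.ofList [28]),
   ("A30", PySem.Set.ofList [1]), ("A31", PySem.Set.ofList [28]), ("A32", PySem.Set.ofList [18]),
   ("A33", PySem.Set.ofList [1]), ("A36", PySem.Set.ofList [1]), ("A37", PySem.Set.ofList [39]),
   ("A38", PySem.Set.ofList [26, 35]), ("A39", PySem.Set.ofList [27, 35]),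
   ("A40", PySem.Set.ofList [27]), ("A41", PySem.Set.ofList [18])]

def mask_importance_list_alt (attack_id : String) : List Int :=
  let removed := PySem.Dict.getD pvRemovedIndicesB attack_id (PySem.Set.ofList [])
  ([47, 46, 16, 27, 35, 26, 39, 38, 44, 37, 17, 34, 0, 1, 5, 6, 7, 8, 18, 25, 28, 36, 40, 41, 45] : List Int).filter
    (fun v => !(PySem.Set.contains removed v))

-- ===== PRECONDITION & SPEC =====
def Spec_mask_importance_list (attack_id : String) (out : List Int) : Prop := out = mask_importance_list_alt attack_id
instance (attack_id : String) (out : List Int) : Decidable (Spec_mask_importance_list attack_id out) := by unfold Spec_mask_importance_list; infer_instance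

-- ===== CLAIM (what is proved, stated in full; the proofs are below) =====
def Claim_equal_mask_importance_list : Prop := ∀ (attack_id : String), Dom_mask_importance_list attack_id → Spec_mask_importance_list attack_id (mask_importance_list attack_id)

-- ===== LEMMAS AND PROOFS =====
set_option maxRecDepth 8192 in
set_option maxHeartbeats 1000000 in
theorem mask_eq_of_not_mem (attack_id : String)
    (h : attack_id ∉ ["A3", "A6", "A7", "A8", "A10", "A11", "A16", "A19", "A20", "A21", "A22",
      "A23", "A25", "A26", "A27", "A30", "A31", "A32", "A33", "A36", "A37", "A38", "A39", "A40", "A41"]) :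
    mask_importance_list attack_id = mask_importance_list_alt attack_id := by
  simp only [List.mem_cons, List.not_mem_nil, or_false, not_or] at h
  obtain ⟨h0, h1, h2, h3, h4, h5, h6, h7, h8, h9, h10, h11, h12, h13, h14, h15, h16, h17, h18, h19, h20, h21, h22, h23, h24⟩ := h
  have eA : pvRemovalMappingA = PySem.Dict.mk
    [("A3", Sum.inl "LIT101"), ("A6", Sum.inl "AIT202"), ("A7", Sum.inl "LIT301"),
     ("A8", Sum.inl "DPIT301"), ("A10", Sum.inl "FIT401"), ("A11", Sum.inl "FIT401"),
     ("A16", Sum.inl "LIT301"), ("A19", Sum.inl "AIT504"), ("A20", Sum.inl "AIT504"),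
     ("A21", Sum.inl "LIT101"), ("A22", Sum.inl "AIT502"), ("A23", Sum.inl "DPIT301"),
     ("A25", Sum.inl "LIT401"), ("A26", Sum.inl "LIT301"), ("A27", Sum.inl "LIT401"),
     ("A30", Sum.inl "LIT101"), ("A31", Sum.inl "LIT401"), ("A32", Sum.inl "LIT301"),
     ("A33", Sum.inl "LIT101"), ("A36", Sum.inl "LIT101"), ("A37", Sum.inl "FIT502"),
     ("A38", Sum.inr ["AIT402", "AIT502"]), ("A39", Sum.inr ["FIT401", "AIT502"]),
     ("A40", Sum.inl "FIT401"), ("A41", Sum.inl "LIT301")] := by decide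
  have eB : pvRemovedIndicesB = PySem.Dict.mk
    [("A3", PySem.Set.ofList [1]), ("A6", PySem.Set.ofList [6]), ("A7", PySem.Set.ofList [18]),
     ("A8", PySem.Set.ofList [16]), ("A10", PySem.Set.ofList [27]), ("A11", PySem.Set.ofList [27]),
     ("A16", PySem.Set.ofList [18]), ("A19", PySem.Set.ofList [37]), ("A20", PySem.Set.ofList [37]),
     ("A21", PySem.Set.ofList [1]), ("A22", PySem.Set.ofList [35]), ("A23", PySem.Set.ofList [16]),
     ("A25", PySem.Set.ofList [28]), ("A26", PySem.Set.ofList [18]), ("A27", PySem.Set.ofList [28]),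
     ("A30", PySem.Set.ofList [1]), ("A31", PySem.Set.ofList [28]), ("A32", PySem.Set.ofList [18]),
     ("A33", PySem.Set.ofList [1]), ("A36", PySem.Set.ofList [1]), ("A37", PySem.Set.ofList [39]),
     ("A38", PySem.Set.ofList [26, 35]), ("A39", PySem.Set.ofList [27, 35]),
     ("A40", PySem.Set.ofList [27]), ("A41", PySem.Set.ofList [18])] := by decide
  have hcA : pvRemovalMappingA.contains attack_id = false := by
    simp [eA, PySem.Dict.contains, Ne.symm h0, Ne.symm h1, Ne.symm h2, Ne.symm h3, Ne.symm h4,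
      Ne.symm h5, Ne.symm h6, Ne.symm h7, Ne.symm h8, Ne.symm h9, Ne.symm h10, Ne.symm h11,
      Ne.symm h12, Ne.symm h13, Ne.symm h14, Ne.symm h15, Ne.symm h16, Ne.symm h17, Ne.symm h18,
      Ne.symm h19, Ne.symm h20, Ne.symm h21, Ne.symm h22, Ne.symm h23, Ne.symm h24]
  have hgB : pvRemovedIndicesB.getD attack_id (PySem.Set.ofList []) = PySem.Set.ofList [] := by
    simp [eB, PySem.Dict.getD, PySem.Dict.get?, Ne.symm h0, Ne.symm h1, Ne.symm h2, Ne.symm h3,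
      Ne.symm h4, Ne.symm h5, Ne.symm h6, Ne.symm h7, Ne.symm h8, Ne.symm h9, Ne.symm h10,
      Ne.symm h11, Ne.symm h12, Ne.symm h13, Ne.symm h14, Ne.symm h15, Ne.symm h16, Ne.symm h17,
      Ne.symm h18, Ne.symm h19, Ne.symm h20, Ne.symm h21, Ne.symm h22, Ne.symm h23, Ne.symm h24]
  simp only [mask_importance_list, mask_importance_list_alt, hcA, hgB, if_false, Bool.false_eq_true]
  decide

-- ===== VERDICT (by name: the statement is the Claim_ definition above) =====
set_option maxHeartbeats 4000000 in
set_option maxRecDepth 8192 in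
theorem mask_importance_list_spec : Claim_equal_mask_importance_list := by
  intro attack_id _
  unfold Spec_mask_importance_list
  by_cases h0 : attack_id = "A3"
  · subst h0; decide
  by_cases h1 : attack_id = "A6"
  · subst h1; decide
  by_cases h2 : attack_id = "A7"
  · subst h2; decide
  by_cases h3 : attack_id = "A8"
  · subst h3; decide
  by_cases h4 : attack_id = "A10"
  · subst h4; decide
  by_cases h5 : attack_id = "A11"
  · subst h5; decide
  by_cases h6 : attack_id = "A16"
  · subst h6; decide
  by_cases h7 : attack_id = "A19"
  · subst h7; decide
  by_cases h8 : attack_id = "A20"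
  · subst h8; decide
  by_cases h9 : attack_id = "A21"
  · subst h9; decide
  by_cases h10 : attack_id = "A22"
  · subst h10; decide
  by_cases h11 : attack_id = "A23"
  · subst h11; decide
  by_cases h12 : attack_id = "A25"
  · subst h12; decide
  by_cases h13 : attack_id = "A26"
  · subst h13; decide
  by_cases h14 : attack_id = "A27"
  · subst h14; decide
  by_cases h15 : attack_id = "A30"
  · subst h15; decide
  by_cases h16 : attack_id = "A31"
  · subst h16; decide
  by_cases h17 : attack_id = "A32"
  · subst h17; decide
  by_cases h18 : attack_id = "A33"
  · subst h18; decide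
  by_cases h19 : attack_id = "A36"
  · subst h19; decide
  by_cases h20 : attack_id = "A37"
  · subst h20; decide
  by_cases h21 : attack_id = "A38"
  · subst h21; decide
  by_cases h22 : attack_id = "A39"
  · subst h22; decide
  by_cases h23 : attack_id = "A40"
  · subst h23; decide
  by_cases h24 : attack_id = "A41"
  · subst h24; decide
  exact mask_eq_of_not_mem attack_id (by simp [h0, h1, h2, h3, h4, h5, h6, h7, h8, h9, h10, h11, h12, h13, h14, h15, h16, h17, h18, h19, h20, h21, h22, h23, h24])
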